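-- pv_equiv track=rewrite | github.com/galush98-del/Group_41 | fly_tau/utils.py | is_english_with_spaces_hyphens
-- ===== SOURCE A (Python) =====
-- def is_english_with_spaces_hyphens(s: str) -> bool:
--     #Validates that a string contains only English letters, spaces, and hyphens, includes at least one letter, and does not start, end, or repeat special characters.
--     if not s:
--         return False
--     s = s.strip()
--     if not s:
--         return False
--
--     allowed = set(" -")
--     has_letter = False
--
--     for ch in s:
--         if ('A' <= ch <= 'Z') or ('a' <= ch <= 'z'):
--             has_letter = True
--         elif ch in allowed:
--             continue
--         else:
--             return False
--
--     if s[0] in allowed or s[-1] in allowed: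
--         return False
--     for i in range(1, len(s)):
--         if s[i] in allowed and s[i-1] in allowed:
--             return False
--
--     return has_letter
-- ===== SOURCE B (Python) =====
-- def is_english_with_spaces_hyphens(s: str) -> bool:
--     # Split the stripped string into tokens on space/hyphen; every token
--     # (including an empty one caused by a leading/trailing/doubled separator)
--     # must be a nonempty run of letters.
--     return all(t.isalpha() for t in s.strip().replace('-', ' ').split(' '))
-- ===== Notes on version B (the rewrite author's own statement) =====
-- stated objective: simpler
-- what changed: Replaces the three imperative passes (character scan with a has_letter flag, endpoint check, adjacent-pair index loop) by one declarative rule: split the stripped string on space/hyphen and require every token to be a nonempty all-letter run.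
import Mathlib
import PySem

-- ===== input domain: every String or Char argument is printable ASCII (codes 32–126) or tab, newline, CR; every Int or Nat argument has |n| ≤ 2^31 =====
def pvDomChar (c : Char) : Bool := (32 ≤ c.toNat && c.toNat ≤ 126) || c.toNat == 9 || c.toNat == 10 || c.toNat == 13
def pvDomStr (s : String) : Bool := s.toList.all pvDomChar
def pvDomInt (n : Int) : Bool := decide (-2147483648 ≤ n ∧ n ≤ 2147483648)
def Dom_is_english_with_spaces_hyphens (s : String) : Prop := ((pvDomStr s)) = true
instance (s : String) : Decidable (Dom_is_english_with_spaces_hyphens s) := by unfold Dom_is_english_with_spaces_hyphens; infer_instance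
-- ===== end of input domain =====

-- B replaces A's three imperative passes by one declarative rule (split on space/hyphen,
-- every token must be a nonempty all-letter run); same return value, not faster, just simpler.

-- ===== PORT A =====
-- ('A' <= ch <= 'Z') or ('a' <= ch <= 'z')
def pvLetter (c : Char) : Bool := (decide ('A' ≤ c) && decide (c ≤ 'Z')) || (decide ('a' ≤ c) && decide (c ≤ 'z'))
-- membership in A's `allowed = set(" -")`
def pvAllowed (c : Char) : Bool := c == ' ' || c == '-'

-- A's first loop: `none` encodes the early `return False`, otherwise the final has_letter flag
def pvScanA : List Char → Bool → Option Bool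
  | [], h => some h
  | c :: t, h =>
    if pvLetter c then pvScanA t true
    else if pvAllowed c then pvScanA t h
    else none

-- A's second loop over `range(1, len(s))` with its two indexings
def pvPairsA (l : List Char) : List Int → Bool
  | [] => true
  | i :: rest =>
    match PySem.List.pyGet? l i, PySem.List.pyGet? l (i - 1) with
    | some a, some b => if pvAllowed a && pvAllowed b then false else pvPairsA l rest
    | _, _ => pvPairsA l rest

def is_english_with_spaces_hyphens (s : String) : Bool :=
  if s = "" then false
  else
    let t := PySem.Str.strip s
    if t = "" then false
    else
      match pvScanA t.toList false with
      | none => false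
      | some hasLetter =>
        match PySem.Str.pyGet? t 0, PySem.Str.pyGet? t (-1) with
        | some c0, some cl =>
          if pvAllowed c0 || pvAllowed cl then false
          else if pvPairsA t.toList (PySem.List.pyRange 1 (PySem.Chars.len t.toList) 1) then hasLetter
          else false
        | _, _ => false   -- unreachable: t is nonempty here

-- ===== PORT B =====
def is_english_with_spaces_hyphens_alt (s : String) : Bool :=
  match PySem.Str.split? (PySem.Str.replace (PySem.Str.strip s) "-" " ") " " with
  | some parts => parts.all PySem.Str.strIsalpha
  | none => false   -- unreachable: the separator " " is nonempty

-- ===== PRECONDITION & SPEC =====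
def Spec_is_english_with_spaces_hyphens (s : String) (out : Bool) : Prop := out = is_english_with_spaces_hyphens_alt s
instance (s : String) (out : Bool) : Decidable (Spec_is_english_with_spaces_hyphens s out) := by unfold Spec_is_english_with_spaces_hyphens; infer_instance

-- ===== CLAIM (what is proved, stated in full; the proofs are below) =====
def Claim_equal_is_english_with_spaces_hyphens : Prop := ∀ (s : String), Dom_is_english_with_spaces_hyphens s → Spec_is_english_with_spaces_hyphens s (is_english_with_spaces_hyphens s)

-- ===== LEMMAS AND PROOFS =====

-- the reference validator: mode false = expecting the start of a letter run, mode true = inside one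
def pvVW : Bool → List Char → Bool
  | false, [] => false
  | true, [] => true
  | false, x :: t => pvLetter x && pvVW true t
  | true, x :: t => if pvLetter x then pvVW true t else pvAllowed x && pvVW false t

-- splitting on a single character c (spec form of Chars.splitOn)
def pvSp (c : Char) : List Char → List (List Char)
  | [] => [[]]
  | x :: t => if x = c then [] :: pvSp c t else (pvSp c t).modifyHead (x :: ·)

-- splitting on either allowed character
def pvSpP : List Char → List (List Char)
  | [] => [[]]
  | x :: t => if pvAllowed x then [] :: pvSpP t else (pvSpP t).modifyHead (x :: ·)

def pvSubst (c : Char) : Char := if c = '-' then ' ' else c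

def pvNoAdj : List Char → Bool
  | a :: b :: r => !(pvAllowed a && pvAllowed b) && pvNoAdj (b :: r)
  | _ => true

def pvLastOk (l : List Char) : Bool :=
  match l.getLast? with
  | none => true
  | some c => !pvAllowed c

def pvHeadOk : List Char → Bool
  | [] => false
  | x :: _ => !pvAllowed x

lemma pvDisj (c : Char) (h : pvLetter c = true) : pvAllowed c = false := by
  simp only [pvAllowed, Bool.or_eq_false_iff, beq_eq_false_iff_ne]
  constructor <;> rintro rfl <;> simp [pvLetter] at h

lemma pvAlpha_eq (c : Char) : PySem.Chars.isalpha c = pvLetter c := rfl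

-- ---------- A side ----------

lemma pvScanA_eq (l : List Char) : ∀ h : Bool,
    pvScanA l h = if l.all (fun c => pvLetter c || pvAllowed c) then some (h || l.any pvLetter) else none := by
  induction l with
  | nil => intro h; simp [pvScanA]
  | cons c t ih =>
    intro h
    by_cases hc : pvLetter c = true
    · simp [pvScanA, hc, ih, Bool.or_comm, Bool.or_assoc, Bool.or_left_comm]
    · by_cases ha : pvAllowed c = true
      · simp [pvScanA, hc, ha, ih]
      · simp [pvScanA, hc, ha]

lemma pvRange_nil (a b : Int) (h : b ≤ a) : PySem.List.pyRange a b 1 = [] := by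
  simp [PySem.List.pyRange, show ¬ a < b by omega]

lemma pvPairsA_eq (l : List Char) : ∀ (k : Nat),
    pvPairsA l (PySem.List.pyRange (k + 1) (l.length) 1) = pvNoAdj (l.drop k) := by
  intro k
  by_cases hk : k + 1 < l.length
  · induction hlen : l.length - (k + 1) generalizing k with
    | zero => omega
    | succ m ih =>
      rw [PySem.List.pyRange_one_cons (by exact_mod_cast hk)]
      have hget1 : PySem.List.pyGet? l ((k : Int) + 1) = l[k + 1]? := by
        exact_mod_cast PySem.List.pyGet?_natCast l (k + 1)
      have hget0 : PySem.List.pyGet? l ((k : Int) + 1 - 1) = l[k]? := by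
        rw [show (k : Int) + 1 - 1 = (k : Int) by ring]
        exact PySem.List.pyGet?_natCast l k
      have h1 : l[k + 1]? = some l[k + 1] := List.getElem?_eq_getElem hk
      have h0 : l[k]? = some l[k] := List.getElem?_eq_getElem (by omega)
      have hdrop : l.drop k = l[k] :: l[k + 1] :: l.drop (k + 2) := by
        rw [List.drop_eq_getElem_cons (l := l) (i := k) (by omega),
            List.drop_eq_getElem_cons (l := l) (i := k + 1) (by omega)]
      have hrec : pvPairsA l (PySem.List.pyRange ((k : Int) + 1 + 1) l.length 1) = pvNoAdj (l.drop (k + 1)) := by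
        by_cases hk2 : k + 2 < l.length
        · have := ih (k + 1) (by omega) (by omega)
          exact_mod_cast this
        · have hr : PySem.List.pyRange ((k : Int) + 1 + 1) l.length 1 = [] :=
            pvRange_nil _ _ (by exact_mod_cast (by omega : (l.length : Int) ≤ (k : Int) + 1 + 1))
          have hnil : l.drop (k + 2) = [] := List.drop_eq_nil_of_le (by omega)
          have hd : l.drop (k + 1) = [l[k + 1]] := by
            rw [List.drop_eq_getElem_cons (l := l) (i := k + 1) (by omega), hnil]
          rw [hr, hd]; simp [pvPairsA, pvNoAdj]
      have hrec' : pvPairsA l (PySem.List.pyRange ((k : Int) + 1 + 1) l.length 1)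
          = pvNoAdj (l[k + 1] :: l.drop (k + 2)) := by
        rw [hrec, List.drop_eq_getElem_cons (l := l) (i := k + 1) (by omega)]
      simp only [pvPairsA, hget1, hget0, h1, h0, hdrop]
      rcases Bool.eq_false_or_eq_true (pvAllowed l[k]) with h' | h' <;>
        rcases Bool.eq_false_or_eq_true (pvAllowed l[k + 1]) with h'' | h'' <;>
        simp_all [pvNoAdj]
  · have hr : PySem.List.pyRange ((k : Int) + 1) l.length 1 = [] :=
      pvRange_nil _ _ (by exact_mod_cast (by omega : (l.length : Int) ≤ (k : Int) + 1))
    have htail : pvNoAdj (l.drop k) = true := by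
      rcases hd : l.drop k with _ | ⟨a, _ | ⟨b, r⟩⟩
      · simp [pvNoAdj]
      · simp [pvNoAdj]
      · exfalso
        have := congrArg List.length hd
        simp at this
        omega
    rw [hr]
    simp [pvPairsA, htail]

-- the reference validator, characterised by A's four conditions
lemma pvVW_char (l : List Char) : ∀ m : Bool,
    pvVW m l = (l.all (fun c => pvLetter c || pvAllowed c) && pvNoAdj l && pvLastOk l &&
      (if m then true else pvHeadOk l)) := by
  induction l with
  | nil => intro m; cases m <;> simp [pvVW, pvNoAdj, pvLastOk, pvHeadOk]
  | cons x t ih =>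
    intro m
    by_cases hx : pvLetter x = true
    · have hax : pvAllowed x = false := pvDisj x hx
      cases t with
      | nil => cases m <;> simp [pvVW, hx, hax, pvNoAdj, pvLastOk, pvHeadOk]
      | cons y r =>
        have hNoAdj : pvNoAdj (x :: y :: r) = pvNoAdj (y :: r) := by simp [pvNoAdj, hax]
        have hl : pvLastOk (x :: y :: r) = pvLastOk (y :: r) := by
          simp [pvLastOk, List.getLast?_cons_cons]
        cases m
        · rw [show pvVW false (x :: y :: r) = pvVW true (y :: r) by simp [pvVW, hx], ih true]
          simp [hNoAdj, hl, pvHeadOk, hax, hx, Bool.and_assoc]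
        · rw [show pvVW true (x :: y :: r) = pvVW true (y :: r) by simp [pvVW, hx], ih true]
          simp [hNoAdj, hl, hx, Bool.and_assoc]
    · have hx' : pvLetter x = false := by simpa using hx
      by_cases ha : pvAllowed x = true
      · cases t with
        | nil => cases m <;> simp [pvVW, hx', ha, pvNoAdj, pvLastOk, pvHeadOk]
        | cons y r =>
          have hNoAdj : pvNoAdj (x :: y :: r) = (!pvAllowed y && pvNoAdj (y :: r)) := by
            simp [pvNoAdj, ha]
          have hl : pvLastOk (x :: y :: r) = pvLastOk (y :: r) := by
            simp [pvLastOk, List.getLast?_cons_cons]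
          cases m
          · simp [pvVW, hx', ha, pvHeadOk]
          · rw [show pvVW true (x :: y :: r) = pvVW false (y :: r) by simp [pvVW, hx', ha], ih false]
            simp only [List.all_cons, hNoAdj, hl, ha, pvHeadOk, hx', Bool.false_or, Bool.true_or,
              Bool.true_and, if_true, if_false]
            cases pvAllowed y <;> cases pvNoAdj (y :: r) <;> cases pvLastOk (y :: r) <;>
              cases pvLetter y <;> cases r.all (fun c => pvLetter c || pvAllowed c) <;>
              simp [pvHeadOk]
      · have ha' : pvAllowed x = false := by simpa using ha
        cases m <;> simp [pvVW, hx', ha']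

-- A's whole body, for a nonempty stripped string, equals the reference validator
lemma pvA_core (l : List Char) (hne : l ≠ []) :
    (match pvScanA l false with
      | none => false
      | some hasLetter =>
        match l.head?, l.getLast? with
        | some c0, some cl =>
          if pvAllowed c0 || pvAllowed cl then false
          else if pvPairsA l (PySem.List.pyRange 1 (l.length) 1) then hasLetter
          else false
        | _, _ => false) = pvVW false l := by
  obtain ⟨x, t, rfl⟩ := List.exists_cons_of_ne_nil hne
  rw [pvScanA_eq]
  have hpairs : pvPairsA (x :: t) (PySem.List.pyRange 1 ((x :: t).length) 1) = pvNoAdj (x :: t) := by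
    have := pvPairsA_eq (x :: t) 0
    simpa using this
  rw [pvVW_char (x :: t) false]
  by_cases hall : (x :: t).all (fun c => pvLetter c || pvAllowed c) = true
  · simp only [hall, if_pos]
    have hgl : (x :: t).getLast? = some ((x :: t).getLast (by simp)) := List.getLast?_eq_some_getLast (by simp)
    rw [hgl]
    simp only [List.head?_cons]
    have hlast : pvLastOk (x :: t) = !pvAllowed ((x :: t).getLast (by simp)) := by
      simp [pvLastOk, hgl]
    by_cases h0 : pvAllowed x = true
    · simp [h0, pvHeadOk, hall]
    · by_cases hl : pvAllowed ((x :: t).getLast (by simp)) = true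
      · simp [h0, hl, hlast]
      · simp only [h0, hl, Bool.or_self, if_false, hpairs, Bool.false_or]
        by_cases hadj : pvNoAdj (x :: t) = true
        · -- everything passes: has_letter must be true since head is a letter
          have hx : pvLetter x = true := by
            have h : (pvLetter x || pvAllowed x) = true := by
              have := List.all_eq_true.mp hall x (by simp)
              simpa using this
            rcases Bool.eq_false_or_eq_true (pvLetter x) with ht | hf
            · exact ht
            · exfalso; rw [hf] at h; simp at h; exact h0 h
          simp [hadj, hall, hlast, hl, pvHeadOk, h0, List.any_cons, hx]
        · simp [hadj, hall, hlast, hl, pvHeadOk, h0, Bool.eq_false_iff.mpr hadj]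
  · simp [hall, Bool.eq_false_iff.mpr hall]

-- ---------- B side ----------

lemma pvReplace_go (o n : Char) (l : List Char) : ∀ (fuel : Nat) (acc : List Char), l.length ≤ fuel →
    PySem.Chars.replace.go [o] [n] fuel l acc = acc.reverse ++ l.map (fun c => if c = o then n else c) := by
  induction l with
  | nil => intro fuel acc _; cases fuel <;> simp [PySem.Chars.replace.go]
  | cons c t ih =>
    intro fuel acc hf
    cases fuel with
    | zero => simp at hf
    | succ f =>
      have hpre : [o].isPrefixOf (c :: t) = (o == c) := by
        simp [List.isPrefixOf]
      by_cases hc : c = o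
      · rw [show PySem.Chars.replace.go [o] [n] (f + 1) (c :: t) acc =
              PySem.Chars.replace.go [o] [n] f (List.drop 1 (c :: t)) ([n].reverse ++ acc) by
            simp [PySem.Chars.replace.go, hpre, hc]]
        simp only [List.drop_succ_cons, List.drop_zero]
        rw [ih f _ (by simpa using Nat.le_of_succ_le_succ hf)]
        simp [hc]
      · rw [show PySem.Chars.replace.go [o] [n] (f + 1) (c :: t) acc =
              PySem.Chars.replace.go [o] [n] f t (c :: acc) by
            simp [PySem.Chars.replace.go, hpre, Ne.symm hc]]
        rw [ih f _ (by simpa using Nat.le_of_succ_le_succ hf)]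
        simp [hc]

lemma pvReplace_single (o n : Char) (l : List Char) :
    PySem.Chars.replace l [o] [n] = l.map (fun c => if c = o then n else c) := by
  rw [show PySem.Chars.replace l [o] [n] = PySem.Chars.replace.go [o] [n] l.length l [] by
      simp [PySem.Chars.replace]]
  simpa using pvReplace_go o n l l.length [] le_rfl

lemma pvSplitOn_go (c : Char) (l : List Char) : ∀ (fuel : Nat) (cur : List Char) (acc : List (List Char)),
    l.length ≤ fuel →
    PySem.Chars.splitOn.go [c] fuel l cur acc =
      acc.reverse ++ (pvSp c l).modifyHead (cur.reverse ++ ·) := by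
  induction l with
  | nil => intro fuel cur acc _; cases fuel <;> simp [PySem.Chars.splitOn.go, pvSp]
  | cons x t ih =>
    intro fuel cur acc hf
    cases fuel with
    | zero => simp at hf
    | succ f =>
      have hpre : [c].isPrefixOf (x :: t) = (c == x) := by
        simp [List.isPrefixOf]
      by_cases hx : x = c
      · rw [show PySem.Chars.splitOn.go [c] (f + 1) (x :: t) cur acc =
              PySem.Chars.splitOn.go [c] f (List.drop 1 (x :: t)) [] (cur.reverse :: acc) by
            simp [PySem.Chars.splitOn.go, hpre, hx]]
        simp only [List.drop_succ_cons, List.drop_zero]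
        rw [ih f _ _ (by simpa using Nat.le_of_succ_le_succ hf)]
        simp [pvSp, hx, List.modifyHead]
        cases pvSp c t <;> rfl
      · rw [show PySem.Chars.splitOn.go [c] (f + 1) (x :: t) cur acc =
              PySem.Chars.splitOn.go [c] f t (x :: cur) acc by
            simp [PySem.Chars.splitOn.go, hpre, Ne.symm hx]]
        rw [ih f _ _ (by simpa using Nat.le_of_succ_le_succ hf)]
        rw [show pvSp c (x :: t) = (pvSp c t).modifyHead (x :: ·) by simp [pvSp, hx]]
        rw [List.modifyHead_modifyHead]
        congr 2
        funext h
        simp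

lemma pvSplitOn_single (c : Char) (l : List Char) :
    PySem.Chars.splitOn l [c] = pvSp c l := by
  rw [show PySem.Chars.splitOn l [c] = PySem.Chars.splitOn.go [c] (l.length + 1) l [] [] by
      simp [PySem.Chars.splitOn]]
  rw [pvSplitOn_go c l (l.length + 1) [] [] (by omega)]
  rcases h : pvSp c l with _ | ⟨a, r⟩ <;> simp [List.modifyHead]

lemma pvSp_map (l : List Char) : pvSp ' ' (l.map pvSubst) = pvSpP l := by
  induction l with
  | nil => simp [pvSp, pvSpP]
  | cons x t ih =>
    by_cases hx : pvAllowed x = true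
    · have : pvSubst x = ' ' := by
        rcases (by simpa [pvAllowed, Bool.or_eq_true, beq_iff_eq] using hx : x = ' ' ∨ x = '-') with rfl | rfl <;>
          simp [pvSubst]
      simp [pvSp, pvSpP, this, hx, ih]
    · have h1 : x ≠ '-' := by rintro rfl; simp [pvAllowed] at hx
      have h2 : pvSubst x ≠ ' ' := by rintro h; simp [pvSubst, h1] at h; exact hx (by simp [pvAllowed, h])
      have h3 : pvSubst x = x := by simp [pvSubst, h1]
      have h4 : x ≠ ' ' := by rintro rfl; simp [pvAllowed] at hx
      simp [pvSp, pvSpP, h3, h4, hx, ih]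

lemma pvSpP_ne_nil (l : List Char) : pvSpP l ≠ [] := by
  induction l with
  | nil => simp [pvSpP]
  | cons x t ih =>
    simp only [pvSpP]
    split
    · simp
    · cases h : pvSpP t
      · exact absurd h ih
      · simp [List.modifyHead]

-- the split-based check equals the reference validator
lemma pvSpP_all (l : List Char) :
    ((pvSpP l).all PySem.Chars.strIsalpha = pvVW false l) ∧
    (∀ p : List Char, p ≠ [] → p.all pvLetter = true →
      (((pvSpP l).modifyHead (p ++ ·)).all PySem.Chars.strIsalpha = pvVW true l)) := by
  induction l with
  | nil =>
    constructor
    · simp [pvSpP, pvVW, PySem.Chars.strIsalpha]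
    · intro p hp hall
      simp [pvSpP, pvVW, PySem.Chars.strIsalpha, List.modifyHead, hp,
        List.all_eq_true.mp hall]
      intro x hx
      exact (List.all_eq_true.mp hall) x hx
  | cons x t ih =>
    by_cases hx : pvAllowed x = true
    · have hlx : pvLetter x = false := by
        by_contra h
        have := pvDisj x (by revert h; cases pvLetter x <;> simp)
        simp [this] at hx
      constructor
      · simp [pvSpP, hx, pvVW, hlx, PySem.Chars.strIsalpha]
      · intro p hp hall
        simp only [pvSpP, hx, if_pos, List.modifyHead, List.all_cons]
        rw [show pvVW true (x :: t) = pvVW false t by simp [pvVW, hlx, hx]]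
        rw [← ih.1]
        have hpa : PySem.Chars.strIsalpha p = true := by
          simp only [PySem.Chars.strIsalpha]
          simp [hp]
          intro a ha
          rw [pvAlpha_eq]
          exact (List.all_eq_true.mp hall) a ha
        simp [hpa]
    · by_cases hlx : pvLetter x = true
      · constructor
        · rw [show pvVW false (x :: t) = pvVW true t by simp [pvVW, hlx]]
          rw [← ih.2 [x] (by simp) (by simp [hlx])]
          simp [pvSpP, hx]
        · intro p hp hall
          rw [show pvVW true (x :: t) = pvVW true t by simp [pvVW, hlx]]
          rw [← ih.2 (p ++ [x]) (by simp) (by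
            simp only [List.all_append, hlx, Bool.and_true, List.all_cons, List.all_nil]
            exact hall)]
          rw [show pvSpP (x :: t) = (pvSpP t).modifyHead (x :: ·) by simp [pvSpP, hx]]
          rw [List.modifyHead_modifyHead]
          congr 2
          funext h
          simp
      · -- x is an illegal character: both sides are false
        have hbad : PySem.Chars.isalpha x = false := by rw [pvAlpha_eq]; simpa using hlx
        have key : ∀ f : List Char → List Char, (∀ h, x ∈ f h) →
            (((pvSpP t).modifyHead f).all PySem.Chars.strIsalpha) = false := by
          intro f hf
          rcases hsp : pvSpP t with _ | ⟨a, r⟩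
          · exact absurd hsp (pvSpP_ne_nil t)
          · simp only [List.modifyHead, List.all_cons]
            have : PySem.Chars.strIsalpha (f a) = false := by
              simp only [PySem.Chars.strIsalpha, Bool.and_eq_false_iff]
              right
              simp only [List.all_eq_false]
              exact ⟨x, hf a, by simp [hbad]⟩
            simp [this]
        constructor
        · rw [show pvVW false (x :: t) = false by simp [pvVW, hlx]]
          simp only [pvSpP, hx, if_neg]
          exact key (x :: ·) (by intro h; simp)
        · intro p hp hall
          rw [show pvVW true (x :: t) = false by simp [pvVW, hlx, hx]]
          rw [show pvSpP (x :: t) = (pvSpP t).modifyHead (x :: ·) by simp [pvSpP, hx]]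
          rw [List.modifyHead_modifyHead]
          exact key _ (by intro h; show x ∈ p ++ (x :: h); simp)

-- ---------- wiring both ports to the validator ----------

lemma pvAlt_eq (s : String) :
    is_english_with_spaces_hyphens_alt s = (pvSpP (PySem.Chars.strip s.toList)).all PySem.Chars.strIsalpha := by
  unfold is_english_with_spaces_hyphens_alt
  rw [show PySem.Str.split? (PySem.Str.replace (PySem.Str.strip s) "-" " ") " " =
      some (List.map String.ofList (PySem.Chars.splitOn
        (PySem.Chars.replace (PySem.Chars.strip s.toList) ['-'] [' ']) [' '])) by
    simp [PySem.Str.split?, PySem.Chars.split?, PySem.Str.toList_replace, PySem.Str.toList_strip]]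
  rw [pvReplace_single, pvSplitOn_single]
  rw [show (fun c => if c = '-' then ' ' else c) = pvSubst from rfl, pvSp_map]
  show (List.map String.ofList (pvSpP (PySem.Chars.strip s.toList))).all PySem.Str.strIsalpha = _
  rw [List.all_map]
  refine List.all_congr rfl (fun a => ?_)
  simp [PySem.Str.strIsalpha, String.toList_ofList]

lemma pvGetNeg1 {α : Type} (l : List α) (h : l ≠ []) : PySem.List.pyGet? l (-1) = l.getLast? := by
  have hlen : 0 < l.length := List.length_pos_iff.mpr h
  rw [List.getLast?_eq_getElem?]
  simp only [PySem.List.pyGet?, PySem.List.pyIdx?]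
  rw [if_neg (by omega), if_pos (by omega : -(l.length : Int) ≤ -1)]
  simp

-- ===== VERDICT (by name: the statement is the Claim_ definition above) =====
theorem is_english_with_spaces_hyphens_spec : Claim_equal_is_english_with_spaces_hyphens := by
  intro s _
  unfold Spec_is_english_with_spaces_hyphens
  rw [pvAlt_eq]
  unfold is_english_with_spaces_hyphens
  by_cases hs : s = ""
  · subst hs; decide
  · rw [if_neg hs]
    by_cases ht : PySem.Str.strip s = ""
    · simp only [ht, if_pos]
      have hnil : PySem.Chars.strip s.toList = [] := by
        have := congrArg String.toList ht
        rw [PySem.Str.toList_strip] at this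
        simpa using this
      rw [hnil]
      simp [pvSpP, PySem.Chars.strIsalpha]
    · rw [if_neg ht]
      have hl : (PySem.Str.strip s).toList = PySem.Chars.strip s.toList := PySem.Str.toList_strip s
      have hne : (PySem.Str.strip s).toList ≠ [] := by
        intro h
        apply ht
        have := congrArg String.ofList h
        rwa [String.ofList_toList] at this
      rw [← hl, (pvSpP_all (PySem.Str.strip s).toList).1]
      have h0 : PySem.Str.pyGet? (PySem.Str.strip s) 0 = (PySem.Str.strip s).toList.head? := by
        have := PySem.Str.pyGet?_natCast (PySem.Str.strip s) 0
        simpa [List.head?_eq_getElem?] using this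
      have hm1 : PySem.Str.pyGet? (PySem.Str.strip s) (-1) = (PySem.Str.strip s).toList.getLast? := by
        show PySem.Chars.pyGet? (PySem.Str.strip s).toList (-1) = _
        rw [PySem.Chars.pyGet?_eq_listPyGet?]
        exact pvGetNeg1 _ hne
      rw [h0, hm1, PySem.Chars.len_eq]
      exact pvA_core (PySem.Str.strip s).toList hne
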